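-- pv_equiv track=rewrite | github.com/Vicodertoten/database | scripts/audit_bird_image_review_v12_live_mini_run.py | compute_v12_failure_reason_distribution
-- ===== SOURCE A (Python) =====
-- from collections import Counter
-- from typing import Any
--
-- def compute_v12_failure_reason_distribution(
--     v12_outcome_summaries: list[dict[str, Any]],
-- ) -> dict[str, int]:
--     counter: Counter[str] = Counter()
--     for item in v12_outcome_summaries:
--         if str(item.get("status") or "") != "bird_image_review_failed":
--             continue
--         reason = str(item.get("failure_reason") or "unknown").strip() or "unknown"
--         counter[reason] += 1
--     return dict(sorted(counter.items()))
-- ===== SOURCE B (Python) =====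
-- from itertools import groupby
--
--
-- def compute_v12_failure_reason_distribution(v12_outcome_summaries):
--     reasons = sorted(
--         str(item.get("failure_reason") or "unknown").strip() or "unknown"
--         for item in v12_outcome_summaries
--         if str(item.get("status") or "") == "bird_image_review_failed"
--     )
--     return {key: len(list(grp)) for key, grp in groupby(reasons)}
-- ===== Notes on version B (the rewrite author's own statement) =====
-- stated objective: alternative
-- what changed: Replaces Counter hash-accumulation plus a final sort of the items with a sort-then-group pass: build the flat list of normalized failure reasons, sort it, and run-length group it with itertools.groupby.
import Mathlib
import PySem

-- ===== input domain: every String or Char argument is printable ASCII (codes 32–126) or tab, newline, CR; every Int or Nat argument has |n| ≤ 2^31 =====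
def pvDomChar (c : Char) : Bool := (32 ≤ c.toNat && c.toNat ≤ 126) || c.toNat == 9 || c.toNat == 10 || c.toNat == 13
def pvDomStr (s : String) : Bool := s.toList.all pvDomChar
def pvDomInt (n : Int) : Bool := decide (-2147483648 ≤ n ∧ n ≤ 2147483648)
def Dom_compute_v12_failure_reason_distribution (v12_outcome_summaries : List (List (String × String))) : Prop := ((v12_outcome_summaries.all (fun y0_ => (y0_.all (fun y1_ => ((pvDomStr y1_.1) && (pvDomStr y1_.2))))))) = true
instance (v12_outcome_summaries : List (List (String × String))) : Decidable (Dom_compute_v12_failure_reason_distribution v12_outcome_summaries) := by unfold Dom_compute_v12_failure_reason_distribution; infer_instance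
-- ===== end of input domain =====

-- B replaces A's Counter hash-accumulation + final sort of the items by a sort-then-group
-- pass over the flat list of normalized reasons (objective: alternative, same cost class).

-- ===== PORT A =====
-- shared subexpressions of both Pythons: str(item.get("status") or "") and
-- str(item.get("failure_reason") or "unknown").strip() or "unknown"
def pvStatus (item : List (String × String)) : String :=
  ((PySem.Dict.mk item).get? "status").getD ""

def pvReason (item : List (String × String)) : String :=
  let r : String :=
    match (PySem.Dict.mk item).get? "failure_reason" with
    | none => "unknown"
    | some s => if s = "" then "unknown" else s
  let t := PySem.Str.strip r
  if t = "" then "unknown" else t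

def compute_v12_failure_reason_distribution (v12_outcome_summaries : List (List (String × String))) : List (String × Int) :=
  let counter : PySem.Dict String Int :=
    v12_outcome_summaries.foldl
      (fun d item =>
        if pvStatus item ≠ "bird_image_review_failed" then d
        else d.modify (pvReason item) 0 (· + 1))
      PySem.Dict.empty
  -- sorted(counter.items()): tuple comparison on pairs whose first components are
  -- DISTINCT (Counter keys are unique) is exactly comparison by the first component
  PySem.List.sorted counter.items (fun p => p.1) false

-- ===== PORT B =====
-- itertools.groupby over a sorted list: each group is emitted as (key, len(list(grp)))
def pvGroupCounts : List String → List (String × Int)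
  | [] => []
  | x :: t =>
      (x, ((t.takeWhile (· == x)).length + 1 : Int)) :: pvGroupCounts (t.dropWhile (· == x))
termination_by l => l.length
decreasing_by
  simpa using Nat.lt_succ_of_le (List.Sublist.length_le (List.dropWhile_sublist _))

def compute_v12_failure_reason_distribution_alt (v12_outcome_summaries : List (List (String × String))) : List (String × Int) :=
  let reasons :=
    PySem.List.sorted
      ((v12_outcome_summaries.filter
          (fun item => pvStatus item == "bird_image_review_failed")).map pvReason)
      (fun s => s) false
  pvGroupCounts reasons

-- ===== PRECONDITION & SPEC =====
def Spec_compute_v12_failure_reason_distribution (v12_outcome_summaries : List (List (String × String))) (out : List (String × Int)) : Prop := out = compute_v12_failure_reason_distribution_alt v12_outcome_summaries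
instance (v12_outcome_summaries : List (List (String × String))) (out : List (String × Int)) : Decidable (Spec_compute_v12_failure_reason_distribution v12_outcome_summaries out) := by unfold Spec_compute_v12_failure_reason_distribution; infer_instance

-- ===== CLAIM (what is proved, stated in full; the proofs are below) =====
def Claim_equal_compute_v12_failure_reason_distribution : Prop := ∀ (v12_outcome_summaries : List (List (String × String))), Dom_compute_v12_failure_reason_distribution v12_outcome_summaries → Spec_compute_v12_failure_reason_distribution v12_outcome_summaries (compute_v12_failure_reason_distribution v12_outcome_summaries)

-- ===== LEMMAS AND PROOFS =====

-- A's guarded counting loop is the Counter of the filtered-and-normalized reason list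
theorem pv_foldl_if_modify {α : Type} (cond : α → Prop) [DecidablePred cond]
    (g : α → String) :
    ∀ (l : List α) (d : PySem.Dict String Int),
      l.foldl (fun d item => if ¬ cond item then d else d.modify (g item) 0 (· + 1)) d
        = ((l.filter (fun x => decide (cond x))).map g).foldl
            (fun d x => d.modify x 0 (· + 1)) d := by
  intro l
  induction l with
  | nil => intro d; rfl
  | cons a t ih =>
      intro d
      by_cases h : cond a
      · rw [List.foldl_cons, if_neg (not_not_intro h),
          List.filter_cons_of_pos (by simpa using h), List.map_cons, List.foldl_cons, ih]
      · rw [List.foldl_cons, if_pos h,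
          List.filter_cons_of_neg (by simpa using h), ih]

-- everything after the maximal run of x's in a ≤-sorted tail is strictly above x
theorem pv_dw_gt (x : String) (t : List String) (hs : (x :: t).Pairwise (· ≤ ·)) :
    ∀ y ∈ t.dropWhile (· == x), x < y := by
  obtain ⟨hxt, ht⟩ := List.pairwise_cons.mp hs
  cases hdw : t.dropWhile (· == x) with
  | nil => simp
  | cons a r =>
      have hpa : ¬ ((a == x) = true) := by
        have := List.head_dropWhile_not (· == x) (l := t)
        simp [hdw] at this; simp [this]
      have hax : a ≠ x := by simpa using hpa
      have hmem : ∀ y ∈ a :: r, y ∈ t := fun y hy =>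
        (List.dropWhile_sublist (l := t) (p := (· == x))).subset (hdw ▸ hy)
      have hxa : x < a := lt_of_le_of_ne (hxt a (hmem a (by simp))) (Ne.symm hax)
      have hpw : (a :: r).Pairwise (· ≤ ·) := hdw ▸ ht.sublist (List.dropWhile_sublist _)
      intro y hy
      rcases List.mem_cons.mp hy with rfl | hyr
      · exact hxa
      · exact lt_of_lt_of_le hxa ((List.pairwise_cons.mp hpw).1 y hyr)

theorem pv_count_head (x : String) (t : List String)
    (hgt : ∀ y ∈ t.dropWhile (· == x), x < y) :
    (x :: t).count x = (t.takeWhile (· == x)).length + 1 := by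
  have htw : (t.takeWhile (· == x)).count x = (t.takeWhile (· == x)).length :=
    List.count_eq_length.mpr
      (fun b hb => (eq_of_beq (List.mem_takeWhile_imp (p := (· == x)) (l := t) hb)).symm)
  have hdw : (t.dropWhile (· == x)).count x = 0 :=
    List.count_eq_zero.mpr (fun hmem => lt_irrefl x (hgt x hmem))
  calc (x :: t).count x = t.count x + 1 := by rw [List.count_cons_self]
    _ = (t.takeWhile (· == x)).length + 1 := by
        conv_lhs => rw [← List.takeWhile_append_dropWhile (p := (· == x)) (l := t)]
        rw [List.count_append, htw, hdw]

theorem pv_count_ne (x : String) (t : List String) (k : String) (hk : k ≠ x) :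
    (x :: t).count k = (t.dropWhile (· == x)).count k := by
  have htw : (t.takeWhile (· == x)).count k = 0 :=
    List.count_eq_zero.mpr (fun hmem =>
      hk (by simpa using List.mem_takeWhile_imp (p := (· == x)) (l := t) hmem))
  rw [List.count_cons_of_ne (Ne.symm hk)]
  conv_lhs => rw [← List.takeWhile_append_dropWhile (p := (· == x)) (l := t)]
  rw [List.count_append, htw, Nat.zero_add]

-- groupby of a ≤-sorted list: its entries are exactly (element, multiplicity)
theorem pv_gc_mem_iff (l : List String) (hs : l.Pairwise (· ≤ ·)) (p : String × Int) :
    p ∈ pvGroupCounts l ↔ p.1 ∈ l ∧ p.2 = (l.count p.1 : Int) := by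
  induction l using pvGroupCounts.induct with
  | case1 => simp [pvGroupCounts]
  | case2 x t ih =>
      have hgt := pv_dw_gt x t hs
      have hdwpw : (t.dropWhile (· == x)).Pairwise (· ≤ ·) :=
        ((List.pairwise_cons.mp hs).2).sublist (List.dropWhile_sublist _)
      have ih' := ih hdwpw
      rw [pvGroupCounts]
      constructor
      · intro hp
        rcases List.mem_cons.mp hp with rfl | hp
        · refine ⟨by simp, ?_⟩
          simp [pv_count_head x t hgt]
        · obtain ⟨h1, h2⟩ := ih'.mp hp
          have hne : p.1 ≠ x := ne_of_gt (hgt p.1 h1)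
          refine ⟨List.mem_cons_of_mem _ ((List.dropWhile_sublist _).subset h1), ?_⟩
          rw [pv_count_ne x t p.1 hne]; exact h2
      · rintro ⟨h1, h2⟩
        by_cases hp : p.1 = x
        · refine List.mem_cons.mpr (Or.inl ?_)
          have : p.2 = ((t.takeWhile (· == x)).length + 1 : Int) := by
            rw [h2, hp, pv_count_head x t hgt]; push_cast; ring
          calc p = (p.1, p.2) := rfl
            _ = (x, ((t.takeWhile (· == x)).length + 1 : Int)) := by rw [hp, this]
        · refine List.mem_cons.mpr (Or.inr ?_)
          apply ih'.mpr
          have h1t : p.1 ∈ t := by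
            rcases List.mem_cons.mp h1 with h | h
            · exact absurd h hp
            · exact h
          have h1dw : p.1 ∈ t.dropWhile (· == x) := by
            have := h1t
            rw [← List.takeWhile_append_dropWhile (p := (· == x)) (l := t)] at this
            rcases List.mem_append.mp this with h | h
            · exact absurd (by simpa using List.mem_takeWhile_imp (p := (· == x)) (l := t) h) hp
            · exact h
          exact ⟨h1dw, by rw [h2, pv_count_ne x t p.1 hp]⟩

-- groupby of a ≤-sorted list has strictly increasing keys
theorem pv_gc_pairwise (l : List String) (hs : l.Pairwise (· ≤ ·)) :
    (pvGroupCounts l).Pairwise (fun a b => a.1 < b.1) := by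
  induction l using pvGroupCounts.induct with
  | case1 => simp [pvGroupCounts]
  | case2 x t ih =>
      have hgt := pv_dw_gt x t hs
      have hdwpw : (t.dropWhile (· == x)).Pairwise (· ≤ ·) :=
        ((List.pairwise_cons.mp hs).2).sublist (List.dropWhile_sublist _)
      rw [pvGroupCounts]
      refine List.pairwise_cons.mpr ⟨?_, ih hdwpw⟩
      intro q hq
      exact hgt q.1 ((pv_gc_mem_iff _ hdwpw q).mp hq).1

-- ===== VERDICT (by name: the statement is the Claim_ definition above) =====
theorem compute_v12_failure_reason_distribution_spec : Claim_equal_compute_v12_failure_reason_distribution := by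
  intro v _
  unfold Spec_compute_v12_failure_reason_distribution
  unfold compute_v12_failure_reason_distribution compute_v12_failure_reason_distribution_alt
  have hcondeq : (fun x => decide (pvStatus x = "bird_image_review_failed"))
      = (fun item => pvStatus item == "bird_image_review_failed") := by
    funext i; exact Eq.symm (Bool.beq_eq_decide_eq _ _)
  have hfold := pv_foldl_if_modify
    (cond := fun item => pvStatus item = "bird_image_review_failed") pvReason v PySem.Dict.empty
  rw [hcondeq] at hfold
  set rs := ((v.filter (fun item => pvStatus item == "bird_image_review_failed")).map pvReason)
    with hrs
  set s := PySem.List.sorted rs (fun s => s) false with hsdef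
  have hsp : s.Pairwise (· ≤ ·) := PySem.List.sorted_pairwise rs (fun s => s)
  have hperm_s : s.Perm rs := PySem.List.sorted_perm rs (fun s => s) false
  show PySem.List.sorted _ (fun p => p.1) false = pvGroupCounts s
  rw [hfold, ← PySem.Dict.counter_eq_foldl, PySem.Dict.items_counter]
  apply PySem.List.sorted_eq_of_perm_of_pairwise_lt
  · -- permutation of the two item lists
    have nd1 : (pvGroupCounts s).Nodup :=
      (pv_gc_pairwise s hsp).imp (fun {a b} h hab => absurd (hab ▸ h) (lt_irrefl _))
    have nd2 : ((PySem.Set.ofList rs).map (fun k => (k, (rs.count k : Int)))).Nodup :=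
      (PySem.Set.nodup_ofList rs).map (fun a b h => congrArg Prod.fst h)
    refine (List.perm_ext_iff_of_nodup nd1 nd2).mpr (fun p => ?_)
    rw [pv_gc_mem_iff s hsp p]
    constructor
    · rintro ⟨h1, h2⟩
      refine List.mem_map.mpr ⟨p.1, (PySem.Set.mem_ofList rs p.1).mpr (hperm_s.mem_iff.mp h1), ?_⟩
      have : p.2 = (rs.count p.1 : Int) := by rw [h2, hperm_s.count_eq]
      calc (p.1, (rs.count p.1 : Int)) = (p.1, p.2) := by rw [this]
        _ = p := rfl
    · intro hp
      obtain ⟨k, hk, hkp⟩ := List.mem_map.mp hp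
      have h1 : p.1 ∈ s := by
        rw [← hkp]; exact hperm_s.mem_iff.mpr ((PySem.Set.mem_ofList rs k).mp hk)
      refine ⟨h1, ?_⟩
      rw [← hkp]
      show (rs.count k : Int) = (s.count k : Int)
      rw [hperm_s.count_eq]
  · exact pv_gc_pairwise s hsp
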